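-- pv_equiv track=rewrite | github.com/GuilloteauQ/study-docker-repro-longevity | analysis/softenv_analysis.py | pkg_changed
-- ===== SOURCE A (Python) =====
-- def pkg_changed(table, artifact_name, pkgname, pkgsource):
--     """
--     Analyzes the given package lists table to determine if the given package
--     changed for the given artifact.
--
--     Parameters
--     ----------
--     table: str
--         Table to analyse.
--
--     artifact_name: str
--         Name of the artifact for which we want to analyze package changes.
--
--     pkgname: str
--         The package we want to track changes.
--
--     pkgsource: str
--         Source of the package, in case there is multiple packages with the
--         same name but different sources.
--
--     Returns
--     -------
--     changed: bool
--         True if the version number of the package changed over time, False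
--         otherwise.
--     """
--     changed = False
--     i = 0
--     pkgver = ""
--     while i < len(table) and not changed:
--         row = table[i]
--         # Artifact name is in the 4th column, package name in the first,
--         # and package source in the 3rd:
--         if row[3] == artifact_name and row[0] == pkgname and row[2] == pkgsource:
--             # If the first version number has not been saved yet:
--             if pkgver == "":
--                 pkgver = row[1] # Package version is in the 2nd column
--             elif row[1] != pkgver:
--                 changed = True
--         i += 1
--     return changed
-- ===== SOURCE B (Python) =====
-- def pkg_changed(table, artifact_name, pkgname, pkgsource):
--     versions = {row[1] for row in table
--                 if row[3] == artifact_name and row[0] == pkgname and row[2] == pkgsource}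
--     return len(versions) > 1
-- ===== Notes on version B (the rewrite author's own statement) =====
-- stated objective: simpler
-- what changed: Replaces A's stateful while-loop (changed/pkgver flags threaded through every row) with a set comprehension of the matching versions and a distinct-count test; Pre_ excludes rows with fewer than 4 columns (A raises IndexError there unless a change was already found) and matching rows whose version is the empty string, a corner where A's sentinel skips '' as 'not yet saved' while counting '' as a version is equally defensible.
-- outside the precondition, e.g. on pkg_changed([['p', '', 's', 'a'], ['p', '1', 's', 'a']], 'a', 'p', 's'): A returns False, B returns True
import Mathlib
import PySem

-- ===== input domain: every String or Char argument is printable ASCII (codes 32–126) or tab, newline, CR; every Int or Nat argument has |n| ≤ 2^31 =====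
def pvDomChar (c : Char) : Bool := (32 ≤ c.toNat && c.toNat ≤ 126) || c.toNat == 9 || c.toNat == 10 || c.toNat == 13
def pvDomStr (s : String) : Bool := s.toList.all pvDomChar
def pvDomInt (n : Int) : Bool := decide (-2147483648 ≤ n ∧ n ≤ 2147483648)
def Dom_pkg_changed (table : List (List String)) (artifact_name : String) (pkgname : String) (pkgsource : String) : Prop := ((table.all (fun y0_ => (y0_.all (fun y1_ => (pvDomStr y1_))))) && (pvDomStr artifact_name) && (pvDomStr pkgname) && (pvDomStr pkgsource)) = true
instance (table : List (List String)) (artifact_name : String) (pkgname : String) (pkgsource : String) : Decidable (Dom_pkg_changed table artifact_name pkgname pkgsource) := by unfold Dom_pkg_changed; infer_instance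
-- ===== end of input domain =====

-- B replaces A's stateful while-loop by a set of matching versions and a distinct-count
-- test; same O(n) cost, objective: simpler. Pre_ excludes short rows and empty versions.


-- ===== PORT A =====
-- A's while loop: recursion over the remaining rows carrying the loop state
-- (changed, pkgver). row[k] is PySem.List.pyGet?; the .getD "" default is never
-- reached under Pre_pkg_changed (every row has ≥ 4 columns), where Python raises.
def pkg_changed_loop (rows : List (List String)) (artifact_name pkgname pkgsource : String)
    (changed : Bool) (pkgver : String) : Bool :=
  match rows with
  | [] => changed
  | row :: rest =>
    if changed then changed
    else
      if (PySem.List.pyGet? row 3).getD "" == artifact_name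
          && (PySem.List.pyGet? row 0).getD "" == pkgname
          && (PySem.List.pyGet? row 2).getD "" == pkgsource then
        if pkgver == "" then
          pkg_changed_loop rest artifact_name pkgname pkgsource changed ((PySem.List.pyGet? row 1).getD "")
        else if (PySem.List.pyGet? row 1).getD "" != pkgver then
          pkg_changed_loop rest artifact_name pkgname pkgsource true pkgver
        else
          pkg_changed_loop rest artifact_name pkgname pkgsource changed pkgver
      else
        pkg_changed_loop rest artifact_name pkgname pkgsource changed pkgver

def pkg_changed (table : List (List String)) (artifact_name : String) (pkgname : String) (pkgsource : String) : Bool :=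
  pkg_changed_loop table artifact_name pkgname pkgsource false ""

-- ===== PORT B =====
-- B: a set comprehension over the matching rows (PySem.Set.ofList of the mapped
-- filter), then len(versions) > 1.
def pkg_changed_alt (table : List (List String)) (artifact_name : String) (pkgname : String) (pkgsource : String) : Bool :=
  let versions : PySem.Set String :=
    PySem.Set.ofList
      ((table.filter (fun row =>
          (PySem.List.pyGet? row 3).getD "" == artifact_name
            && (PySem.List.pyGet? row 0).getD "" == pkgname
            && (PySem.List.pyGet? row 2).getD "" == pkgsource)).map
        (fun row => (PySem.List.pyGet? row 1).getD ""))
  decide (1 < versions.length)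

-- ===== PRECONDITION & SPEC =====
-- Pre_ excludes (a) tables with a row of fewer than 4 columns — Python A raises
-- IndexError on them, except when a change was already detected earlier (then A
-- returns True but B's comprehension still raises IndexError) — and (b) tables in
-- which a matching row records the empty string as its version: A's "" sentinel
-- means 'no version saved yet', so such a row never serves as reference, while
-- counting "" as a version (B) is an equally defensible reading of this corner.
def Pre_pkg_changed (table : List (List String)) (artifact_name : String) (pkgname : String) (pkgsource : String) : Prop :=
  (∀ row ∈ table, 4 ≤ row.length) ∧
  (∀ row ∈ table,
     (row.getD 3 "" = artifact_name ∧ row.getD 0 "" = pkgname ∧ row.getD 2 "" = pkgsource) →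
     row.getD 1 "" ≠ "")
instance (table : List (List String)) (artifact_name : String) (pkgname : String) (pkgsource : String) : Decidable (Pre_pkg_changed table artifact_name pkgname pkgsource) := by unfold Pre_pkg_changed; infer_instance

def pvWitness_pkg_changed : List (List String) × String × String × String :=
  ([["pkg", "1.0", "src", "art"], ["pkg", "2.0", "src", "art"]], "art", "pkg", "src")

def Spec_pkg_changed (table : List (List String)) (artifact_name : String) (pkgname : String) (pkgsource : String) (out : Bool) : Prop := out = pkg_changed_alt table artifact_name pkgname pkgsource
instance (table : List (List String)) (artifact_name : String) (pkgname : String) (pkgsource : String) (out : Bool) : Decidable (Spec_pkg_changed table artifact_name pkgname pkgsource out) := by unfold Spec_pkg_changed; infer_instance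

-- ===== CLAIM (what is proved, stated in full; the proofs are below) =====
def Claim_equal_pkg_changed : Prop := ∀ (table : List (List String)) (artifact_name : String) (pkgname : String) (pkgsource : String), Dom_pkg_changed table artifact_name pkgname pkgsource → Pre_pkg_changed table artifact_name pkgname pkgsource → Spec_pkg_changed table artifact_name pkgname pkgsource (pkg_changed table artifact_name pkgname pkgsource)

-- ===== LEMMAS AND PROOFS =====

-- The list of versions of the matching rows (proof-side abbreviation).
def pkg_changed_versions (table : List (List String)) (artifact_name pkgname pkgsource : String) : List String :=
  (table.filter (fun row =>
      (PySem.List.pyGet? row 3).getD "" == artifact_name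
        && (PySem.List.pyGet? row 0).getD "" == pkgname
        && (PySem.List.pyGet? row 2).getD "" == pkgsource)).map
    (fun row => (PySem.List.pyGet? row 1).getD "")

-- Once a non-empty reference version p is fixed, A's loop is exactly "some later
-- matching version differs from p".
theorem pkg_changed_loop_ref (rows : List (List String)) (an pn ps p : String) (hp : ¬ (p == "") = true) :
    pkg_changed_loop rows an pn ps false p
      = (pkg_changed_versions rows an pn ps).any (fun v => v != p) := by
  induction rows with
  | nil => simp [pkg_changed_loop, pkg_changed_versions]
  | cons row rest ih =>
    simp only [pkg_changed_loop, pkg_changed_versions, List.filter_cons]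
    by_cases hm : ((PySem.List.pyGet? row 3).getD "" == an
        && (PySem.List.pyGet? row 0).getD "" == pn
        && (PySem.List.pyGet? row 2).getD "" == ps) = true
    · simp only [hm, if_pos, hp, List.map_cons, List.any_cons]
      by_cases hd : ((PySem.List.pyGet? row 1).getD "" != p) = true
      · have : pkg_changed_loop rest an pn ps true p = true := by
          cases rest <;> simp [pkg_changed_loop]
        simp [hd, this]
      · simp only [hd]
        rw [ih]
        simp only [pkg_changed_versions]
        simp only [bne] at hd
        simp at hd
        simp
    · simp only [hm]
      rw [ih]
      simp [pkg_changed_versions]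

-- A list with two distinct members has more than one element.
theorem one_lt_length_of_two_mem {α : Type} {xs : List α} {x y : α}
    (hx : x ∈ xs) (hy : y ∈ xs) (hne : x ≠ y) : 1 < xs.length := by
  match xs with
  | [] => cases hx
  | [a] =>
    simp at hx hy
    exact absurd (hx.trans hy.symm) hne
  | a :: b :: t => simp

-- If every element of tl equals v, set(v :: tl) is just [v].
theorem ofList_cons_all_eq (v : String) (tl : List String)
    (h : ∀ w ∈ tl, w = v) : PySem.Set.ofList (v :: tl) = [v] := by
  rw [PySem.Set.ofList_cons]
  have : PySem.Set.discard (PySem.Set.ofList tl) v = [] := by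
    rw [List.eq_nil_iff_forall_not_mem]
    intro w hw
    rw [PySem.Set.mem_discard] at hw
    exact hw.2 (h w (by have := hw.1; rwa [PySem.Set.mem_ofList] at this))
  rw [this]

-- For a nonempty version list headed by v: "some later version differs from v"
-- is exactly "more than one distinct version".
theorem any_ne_head_iff_one_lt (v : String) (tl : List String) :
    (tl.any (fun w => w != v)) = decide (1 < (PySem.Set.ofList (v :: tl)).length) := by
  by_cases hall : ∀ w ∈ tl, w = v
  · rw [ofList_cons_all_eq v tl hall]
    simp only [List.length_cons, List.length_nil]
    have : tl.any (fun w => w != v) = false := by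
      simp only [List.any_eq_false]
      intro w hw
      simp [hall w hw]
    simp [this]
  · simp only [not_forall, exists_prop] at hall
    obtain ⟨w, hw, hne⟩ := hall
    have h1 : tl.any (fun w => w != v) = true := by
      simp only [List.any_eq_true]
      exact ⟨w, hw, by simpa using hne⟩
    have hv : v ∈ PySem.Set.ofList (v :: tl) := by rw [PySem.Set.mem_ofList]; simp
    have hwm : w ∈ PySem.Set.ofList (v :: tl) := by rw [PySem.Set.mem_ofList]; simp [hw]
    have := one_lt_length_of_two_mem hwm hv hne
    simp [h1, this]

-- While pkgver is still "", with no matching "" versions, A's loop equals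
-- "more than one distinct matching version".
theorem pkg_changed_loop_main (rows : List (List String)) (an pn ps : String)
    (h : ∀ v ∈ pkg_changed_versions rows an pn ps, v ≠ "") :
    pkg_changed_loop rows an pn ps false ""
      = decide (1 < (PySem.Set.ofList (pkg_changed_versions rows an pn ps)).length) := by
  induction rows with
  | nil => simp [pkg_changed_loop, pkg_changed_versions, PySem.Set.ofList_nil]
  | cons row rest ih =>
    simp only [pkg_changed_loop]
    by_cases hm : ((PySem.List.pyGet? row 3).getD "" == an
        && (PySem.List.pyGet? row 0).getD "" == pn
        && (PySem.List.pyGet? row 2).getD "" == ps) = true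
    · have hcons : pkg_changed_versions (row :: rest) an pn ps
          = (PySem.List.pyGet? row 1).getD "" :: pkg_changed_versions rest an pn ps := by
        simp [pkg_changed_versions, hm]
      have hv : (PySem.List.pyGet? row 1).getD "" ≠ "" := by
        apply h
        rw [hcons]; simp
      simp only [hm, if_pos, Bool.false_eq_true, if_false, beq_self_eq_true]
      rw [pkg_changed_loop_ref rest an pn ps _ (by simpa using hv)]
      rw [hcons]
      exact any_ne_head_iff_one_lt _ _
    · have hcons : pkg_changed_versions (row :: rest) an pn ps
          = pkg_changed_versions rest an pn ps := by
        simp [pkg_changed_versions, hm]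
      simp only [hm, Bool.false_eq_true, if_false]
      rw [hcons]
      exact ih (by rw [hcons] at h; exact h)

-- ===== VERDICT (by name: the statement is the Claim_ definition above) =====
theorem pkg_changed_spec : Claim_equal_pkg_changed := by
  intro table an pn ps _ hpre
  unfold Spec_pkg_changed pkg_changed pkg_changed_alt
  obtain ⟨hlen, hver⟩ := hpre
  apply pkg_changed_loop_main
  intro v hv
  simp only [pkg_changed_versions, List.mem_map, List.mem_filter] at hv
  obtain ⟨row, ⟨hrow, hm⟩, hveq⟩ := hv
  have h4 := hlen row hrow
  have h0 : 0 < row.length := by omega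
  have h1 : 1 < row.length := by omega
  have h2 : 2 < row.length := by omega
  have h3 : 3 < row.length := by omega
  have g0 : (PySem.List.pyGet? row 0).getD "" = row.getD 0 "" := by
    simp [pysem, h0, List.getD]
  have g1 : (PySem.List.pyGet? row 1).getD "" = row.getD 1 "" := by
    simp [pysem, h1, List.getD]
  have g2 : (PySem.List.pyGet? row 2).getD "" = row.getD 2 "" := by
    simp [pysem, h2, List.getD]
  have g3 : (PySem.List.pyGet? row 3).getD "" = row.getD 3 "" := by
    simp [pysem, h3, List.getD]
  simp only [Bool.and_eq_true, beq_iff_eq] at hm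
  subst hveq
  rw [g1]
  exact hver row hrow ⟨g3 ▸ hm.1.1, g0 ▸ hm.1.2, g2 ▸ hm.2⟩
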